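-- pv_equiv track=rewrite | github.com/mskozlova/advent_of_code | 2023/day14/day14_pt1.py | get_column_load
-- ===== SOURCE A (Python) =====
-- def get_column_load(map, column_num):
--     total_rows = len(map)
--     last_occupied_row = -1
--     load = 0
--
--     for row in range(total_rows):
--         symbol = map[row][column_num]
--
--         if symbol == ".":
--             pass
--         elif symbol == "O":
--             last_occupied_row += 1
--             load += total_rows - last_occupied_row
--         else:  # symbol == "#"
--             last_occupied_row = row
--
--     return load
-- ===== SOURCE B (Python) =====
-- def get_column_load(map, column_num):
--     n = len(map)
--     col = [row[column_num] for row in map]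
--     load = 0
--     top = 0  # first free row of the current segment
--     while top <= n:
--         # scan the segment starting at `top`: count its rocks, find its end
--         end = top
--         r = 0
--         while end < n and (col[end] == "." or col[end] == "O"):
--             if col[end] == "O":
--                 r += 1
--             end += 1
--         # closed-form load of r rocks stacked from row `top`
--         load += r * (n - top) - r * (r - 1) // 2
--         top = end + 1
--     return load
-- ===== Notes on version B (the rewrite author's own statement) =====
-- stated objective: alternative
-- what changed: B extracts the column once, then walks it segment by segment (an inner scan finds the next barrier and counts the segment's rocks) and adds each segment's load in closed form r*(n-top) - r*(r-1)//2, instead of A's single pass with a per-rock incremental last_occupied_row update.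
import Mathlib
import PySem

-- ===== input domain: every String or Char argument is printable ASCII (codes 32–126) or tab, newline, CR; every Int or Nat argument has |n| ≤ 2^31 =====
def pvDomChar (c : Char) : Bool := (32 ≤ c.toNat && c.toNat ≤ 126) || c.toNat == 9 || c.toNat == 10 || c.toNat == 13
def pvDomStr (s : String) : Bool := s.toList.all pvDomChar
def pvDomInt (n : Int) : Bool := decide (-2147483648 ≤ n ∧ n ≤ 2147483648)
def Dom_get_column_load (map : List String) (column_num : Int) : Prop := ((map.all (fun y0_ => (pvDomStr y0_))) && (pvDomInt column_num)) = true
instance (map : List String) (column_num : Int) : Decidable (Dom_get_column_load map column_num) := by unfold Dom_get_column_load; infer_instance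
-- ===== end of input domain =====

-- B walks the extracted column segment by segment (scan to each barrier, count rocks,
-- add the segment's load in closed form) instead of A's per-rock incremental update
-- (alternative decomposition, same cost).


-- ===== PORT A =====
-- map[row][column_num], totalised with a default (Pre_ keeps the index in range for every row)
def pvSym (map : List String) (column_num : Int) (row : Int) : Char :=
  ((PySem.List.pyGet? map row).bind (fun s => PySem.Str.pyGet? s column_num)).getD ' '

-- A's loop body on state (last_occupied_row, load)
def pvStepA (n : Int) (sym : Int → Char) (st : Int × Int) (row : Int) : Int × Int :=
  let symbol := sym row
  if symbol = '.' then st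
  else if symbol = 'O' then (st.1 + 1, st.2 + (n - (st.1 + 1)))
  else (row, st.2)

def get_column_load (map : List String) (column_num : Int) : Int :=
  let total_rows : Int := (map.length : Int)
  ((PySem.List.pyRange 0 total_rows).foldl
    (pvStepA total_rows (pvSym map column_num)) (-1, 0)).2

-- ===== PORT B =====
-- B's inner while: scan to the next barrier, returning (rocks counted, rows consumed, rest of the column)
def pvScan : List Char → Int × Int × List Char
  | [] => (0, 0, [])
  | c :: cs =>
    if c = '.' ∨ c = 'O' then
      let s := pvScan cs
      ((if c = 'O' then s.1 + 1 else s.1), s.2.1 + 1, s.2.2)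
    else (0, 0, c :: cs)

-- needed by pvSegs's termination
theorem pvScan_length_le : ∀ cs : List Char, (pvScan cs).2.2.length ≤ cs.length := by
  intro cs
  induction cs with
  | nil => simp [pvScan]
  | cons c cs ih =>
      by_cases h : c = '.' ∨ c = 'O' <;> simp [pvScan, h] <;> omega

-- B's outer while: one recursive step per barrier-delimited segment
def pvSegs (n top : Int) (cs : List Char) : Int :=
  let s := pvScan cs
  let seg := s.1 * (n - top) - PySem.Int.floordiv (s.1 * (s.1 - 1)) 2
  match h : s.2.2 with
  | [] => seg
  | _ :: rest' => seg + pvSegs n (top + s.2.1 + 1) rest'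
termination_by cs.length
decreasing_by
  have := pvScan_length_le cs
  rw [h] at this
  simp at this ⊢
  omega

def get_column_load_alt (map : List String) (column_num : Int) : Int :=
  let n : Int := (map.length : Int)
  let col := map.map (fun row => (PySem.Str.pyGet? row column_num).getD ' ')
  pvSegs n 0 col

-- ===== PRECONDITION & SPEC =====
-- Pre_ excludes exactly the inputs where Python A raises IndexError (column_num out of
-- range for some row); Python B raises there as well (while building the column).
def Pre_get_column_load (map : List String) (column_num : Int) : Prop :=
  ∀ s ∈ map, PySem.Raise.InRange s.toList.length column_num
instance (map : List String) (column_num : Int) : Decidable (Pre_get_column_load map column_num) := by unfold Pre_get_column_load; infer_instance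

def pvWitness_get_column_load : List String × Int := (["O.#", ".O.", "#OO"], 1)

def Spec_get_column_load (map : List String) (column_num : Int) (out : Int) : Prop := out = get_column_load_alt map column_num
instance (map : List String) (column_num : Int) (out : Int) : Decidable (Spec_get_column_load map column_num out) := by unfold Spec_get_column_load; infer_instance

-- ===== CLAIM (what is proved, stated in full; the proofs are below) =====
def Claim_equal_get_column_load : Prop := ∀ (map : List String) (column_num : Int), Dom_get_column_load map column_num → Pre_get_column_load map column_num → Spec_get_column_load map column_num (get_column_load map column_num)

-- ===== LEMMAS AND PROOFS =====

-- proof-side view of A's loop: recursion over the column's characters with their row index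
def pvStepAc (n : Int) (c : Char) (pos : Int) (st : Int × Int) : Int × Int :=
  if c = '.' then st
  else if c = 'O' then (st.1 + 1, st.2 + (n - (st.1 + 1)))
  else (pos, st.2)

def pvGoA (n : Int) : List Char → Int → (Int × Int) → (Int × Int)
  | [], _, st => st
  | c :: cs, pos, st => pvGoA n cs (pos + 1) (pvStepAc n c pos st)

theorem pv_fd_two_mul (m : Int) : PySem.Int.floordiv (2 * m) 2 = m := by
  rw [PySem.Int.floordiv_eq_ediv_of_pos (by norm_num)]
  omega

-- fd(r(r+1)) = fd(r(r-1)) + r (halves)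
theorem pv_fd_succ (r : Int) :
    PySem.Int.floordiv ((r + 1) * r) 2 = PySem.Int.floordiv (r * (r - 1)) 2 + r := by
  have he : Even (r * (r - 1)) := by
    rcases Int.even_or_odd r with h | h
    · exact h.mul_right _
    · exact (Odd.sub_odd h odd_one).mul_left _
  obtain ⟨k, hk⟩ := he
  have h1 : r * (r - 1) = 2 * k := by linarith
  have h2 : (r + 1) * r = 2 * (k + r) := by linear_combination h1
  rw [h1, h2, pv_fd_two_mul, pv_fd_two_mul]

-- A's fold over pyRange equals the indexed recursion over the column characters
theorem pvFoldA_eq (n : Int) (sym : Int → Char) :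
    ∀ (cs : List Char) (pos : Nat) (st : Int × Int),
      (∀ i : Nat, i < cs.length → sym ((pos : Int) + i) = cs.getD i ' ') →
      (PySem.List.pyRange (pos : Int) ((pos : Int) + cs.length)).foldl (pvStepA n sym) st
        = pvGoA n cs (pos : Int) st := by
  intro cs
  induction cs with
  | nil => intro pos st _; simp [PySem.List.pyRange_one_eq_nil, pvGoA]
  | cons c cs ih =>
      intro pos st h
      have hlt : (pos : Int) < (pos : Int) + (c :: cs).length := by
        simp
      rw [PySem.List.pyRange_one_cons hlt, List.foldl_cons]
      have hc : sym (pos : Int) = c := by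
        have := h 0 (by simp)
        simpa using this
      have hstep : pvStepA n sym st (pos : Int) = pvStepAc n c (pos : Int) st := by
        simp [pvStepA, pvStepAc, hc]
      rw [hstep]
      have hcast : ((pos : Int) + 1) = ((pos + 1 : Nat) : Int) := by push_cast; ring
      have hend : (pos : Int) + ((c :: cs).length : Int) = ((pos + 1 : Nat) : Int) + cs.length := by
        simp only [List.length_cons]; push_cast; ring
      have h' : ∀ i : Nat, i < cs.length → sym (((pos + 1 : Nat) : Int) + i) = cs.getD i ' ' := by
        intro i hi
        have hh := h (i + 1) (by simp; omega)
        have harg : ((pos + 1 : Nat) : Int) + i = (pos : Int) + ((i + 1 : Nat) : Int) := by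
          push_cast; ring
        rw [harg, hh]
        simp
      rw [hend, hcast, ih (pos + 1) (pvStepAc n c (pos : Int) st) h']
      conv_rhs => rw [pvGoA]
      rw [hcast]

-- pvScan's effect on A's indexed recursion: consuming the barrier-free prefix
theorem pvScan_spec (n : Int) :
    ∀ (cs : List Char) (pos last load : Int),
      pvGoA n cs pos (last, load)
        = pvGoA n (pvScan cs).2.2 (pos + (pvScan cs).2.1)
            (last + (pvScan cs).1,
             load + (pvScan cs).1 * (n - last - 1)
               - PySem.Int.floordiv ((pvScan cs).1 * ((pvScan cs).1 - 1)) 2) := by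
  intro cs
  induction cs with
  | nil =>
      intro pos last load
      simp [pvScan, pvGoA]
  | cons c cs ih =>
      intro pos last load
      by_cases h : c = '.' ∨ c = 'O'
      · rcases h with h | h
        · -- '.' : state unchanged
          subst h
          have hsc : pvScan ('.' :: cs)
              = ((pvScan cs).1, (pvScan cs).2.1 + 1, (pvScan cs).2.2) := by
            simp only [pvScan]
            rw [if_pos (Or.inl trivial), if_neg (by decide : ¬ ('.' : Char) = 'O')]
          rw [hsc]
          simp only [pvGoA, pvStepAc]
          rw [if_pos trivial]
          rw [ih (pos + 1) last load]
          have hp : pos + 1 + (pvScan cs).2.1 = pos + ((pvScan cs).2.1 + 1) := by ring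
          rw [hp]
        · -- 'O' : one more rock
          subst h
          have hsc : pvScan ('O' :: cs)
              = ((pvScan cs).1 + 1, (pvScan cs).2.1 + 1, (pvScan cs).2.2) := by
            simp only [pvScan]
            rw [if_pos (Or.inr trivial), if_pos trivial]
          rw [hsc]
          simp only [pvGoA, pvStepAc]
          rw [if_neg (by decide : ¬ ('O' : Char) = '.'), if_pos trivial]
          rw [ih (pos + 1) (last + 1) (load + (n - (last + 1)))]
          have hp : pos + 1 + (pvScan cs).2.1 = pos + ((pvScan cs).2.1 + 1) := by ring
          have hl : last + 1 + (pvScan cs).1 = last + ((pvScan cs).1 + 1) := by ring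
          have hload :
              load + (n - (last + 1)) + (pvScan cs).1 * (n - (last + 1) - 1)
                - PySem.Int.floordiv ((pvScan cs).1 * ((pvScan cs).1 - 1)) 2
              = load + ((pvScan cs).1 + 1) * (n - last - 1)
                - PySem.Int.floordiv (((pvScan cs).1 + 1) * ((pvScan cs).1 + 1 - 1)) 2 := by
            have hfd := pv_fd_succ (pvScan cs).1
            have : (pvScan cs).1 + 1 - 1 = (pvScan cs).1 := by ring
            rw [this, hfd]
            ring
          rw [hp, hl, hload]
      · -- barrier: pvScan stops immediately
        have hsc : pvScan (c :: cs) = (0, 0, c :: cs) := by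
          simp only [pvScan]
          rw [if_neg h]
        rw [hsc]
        simp

-- barrier-headed remainder: the head of pvScan's rest is never '.' or 'O'
theorem pvScan_barrier :
    ∀ (cs : List Char) (b : Char) (rest' : List Char),
      (pvScan cs).2.2 = b :: rest' → ¬ (b = '.' ∨ b = 'O') := by
  intro cs
  induction cs with
  | nil => intro b rest' h; simp [pvScan] at h
  | cons c cs ih =>
      intro b rest' h
      by_cases hc : c = '.' ∨ c = 'O'
      · simp only [pvScan, if_pos hc] at h
        exact ih b rest' h
      · simp only [pvScan, if_neg hc] at h
        obtain ⟨hb, -⟩ := List.cons.inj h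
        rw [← hb]
        exact hc

-- length bookkeeping for the strong induction
theorem pvScan_rest_lt :
    ∀ (cs : List Char) (b : Char) (rest' : List Char),
      (pvScan cs).2.2 = b :: rest' → rest'.length < cs.length := by
  intro cs b rest' h
  have := pvScan_length_le cs
  rw [h] at this
  simp at this
  omega

-- pvSegs unfolded on the two shapes of pvScan's remainder
theorem pvSegs_eq_nil (n top : Int) (cs : List Char) (h : (pvScan cs).2.2 = []) :
    pvSegs n top cs
      = (pvScan cs).1 * (n - top)
        - PySem.Int.floordiv ((pvScan cs).1 * ((pvScan cs).1 - 1)) 2 := by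
  rw [pvSegs]
  split
  · rfl
  · rename_i heq
    rw [h] at heq
    cases heq

theorem pvSegs_eq_cons (n top : Int) (cs : List Char) (b : Char) (rest' : List Char)
    (h : (pvScan cs).2.2 = b :: rest') :
    pvSegs n top cs
      = ((pvScan cs).1 * (n - top)
          - PySem.Int.floordiv ((pvScan cs).1 * ((pvScan cs).1 - 1)) 2)
        + pvSegs n (top + (pvScan cs).2.1 + 1) rest' := by
  rw [pvSegs]
  split
  · rename_i heq
    rw [h] at heq
    cases heq
  · rename_i x xs heq
    rw [h] at heq
    cases heq
    rfl

-- main loop invariant: A's recursion started at a segment boundary computes B's pvSegs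
theorem pvSegs_spec (n : Int) :
    ∀ (cs : List Char) (top load : Int),
      (pvGoA n cs top (top - 1, load)).2 = load + pvSegs n top cs := by
  have H : ∀ (m : Nat) (cs : List Char), cs.length ≤ m → ∀ (top load : Int),
      (pvGoA n cs top (top - 1, load)).2 = load + pvSegs n top cs := by
    intro m
    induction m with
    | zero =>
        intro cs hcs top load
        have hnil : cs = [] := List.eq_nil_of_length_eq_zero (by omega)
        subst hnil
        have h0 : (pvScan ([] : List Char)).2.2 = [] := by simp [pvScan]
        rw [pvSegs_eq_nil n top [] h0]
        simp [pvGoA, pvScan]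
    | succ m ih =>
        intro cs hcs top load
        rw [pvScan_spec n cs top (top - 1) load]
        have harg : top - 1 + (pvScan cs).1 = top + (pvScan cs).1 - 1 := by ring
        have harg2 : n - (top - 1) - 1 = n - top := by ring
        rcases hrest : (pvScan cs).2.2 with _ | ⟨b, rest'⟩
        · simp only [pvGoA]
          rw [pvSegs_eq_nil n top cs hrest]
          ring_nf
        · have hb := pvScan_barrier cs b rest' hrest
          have hbd : ¬ b = '.' := fun hx => hb (Or.inl hx)
          have hbO : ¬ b = 'O' := fun hx => hb (Or.inr hx)
          simp only [pvGoA, pvStepAc, if_neg hbd, if_neg hbO]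
          have hlen : rest'.length ≤ m := by
            have := pvScan_rest_lt cs b rest' hrest
            omega
          have hkey := ih rest' hlen (top + (pvScan cs).2.1 + 1)
            (load + (pvScan cs).1 * (n - (top - 1) - 1)
              - PySem.Int.floordiv ((pvScan cs).1 * ((pvScan cs).1 - 1)) 2)
          have hpos : top + (pvScan cs).2.1 + 1 - 1 = top + (pvScan cs).2.1 := by ring
          rw [hpos] at hkey
          rw [hkey, pvSegs_eq_cons n top cs b rest' hrest, harg2]
          ring
  intro cs top load
  exact H cs.length cs le_rfl top load

-- the totalised per-row symbol equals the corresponding column entry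
theorem pvSym_eq_col (map : List String) (column_num : Int) :
    ∀ i : Nat, i < (map.map (fun row => (PySem.Str.pyGet? row column_num).getD ' ')).length →
      pvSym map column_num (((0 : Nat) : Int) + i)
        = (map.map (fun row => (PySem.Str.pyGet? row column_num).getD ' ')).getD i ' ' := by
  intro i hi
  simp only [List.length_map] at hi
  have h1 : PySem.List.pyGet? map (((0 : Nat) : Int) + i) = some (map[i]) := by
    have hc : (((0 : Nat) : Int) + i) = ((i : Nat) : Int) := by push_cast; ring
    rw [hc, PySem.List.pyGet?_natCast]
    simp [List.getElem?_eq_getElem hi]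
  simp only [pvSym, h1, Option.bind_some]
  rw [List.getD_eq_getElem _ _ (by simpa using hi)]
  simp

-- ===== VERDICT (by name: the statement is the Claim_ definition above) =====
theorem get_column_load_spec : Claim_equal_get_column_load := by
  intro map column_num _ _
  unfold Spec_get_column_load
  simp only [get_column_load, get_column_load_alt]
  have hfold := pvFoldA_eq ((map.length : Int)) (pvSym map column_num)
      (map.map (fun row => (PySem.Str.pyGet? row column_num).getD ' ')) 0 ((-1 : Int), (0 : Int))
      (pvSym_eq_col map column_num)
  simp only [Nat.cast_zero, zero_add, List.length_map] at hfold
  rw [hfold]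
  have hsegs := pvSegs_spec ((map.length : Int))
      (map.map (fun row => (PySem.Str.pyGet? row column_num).getD ' ')) 0 0
  simp only [zero_sub, zero_add] at hsegs
  exact hsegs
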